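-- pv_equiv track=rewrite | github.com/zhumengling/astrbot_plugin_vrc_friend_radar | main.py | _pick_active_periods
-- ===== SOURCE A (Python) =====
-- from collections import Counter
--
-- def _pick_active_periods(hour_counter: Counter) -> list[str]:
--     buckets = {
--         "\u51cc\u6668\u6f2b\u6e38": range(0, 5),
--         "\u6e05\u6668\u6563\u6b65": range(5, 9),
--         "\u5348\u540e\u9a7b\u7559": range(9, 15),
--         "\u9ec4\u660f\u793e\u4ea4": range(15, 20),
--         "\u6df1\u591c\u72c2\u6b22": range(20, 24),
--     }
--     scored = []
--     for label, hours in buckets.items():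
--         scored.append((sum(int(hour_counter.get(h, 0)) for h in hours), label))
--     scored.sort(key=lambda x: (-x[0], x[1]))
--     result = [label for score, label in scored if score > 0][:2]
--     return result or ["\u884c\u8e2a\u8f7b\u76c8"]
-- ===== SOURCE B (Python) =====
-- from collections import Counter
--
-- _LABELS = ["\u51cc\u6668\u6f2b\u6e38", "\u6e05\u6668\u6563\u6b65",
--            "\u5348\u540e\u9a7b\u7559", "\u9ec4\u660f\u793e\u4ea4",
--            "\u6df1\u591c\u72c2\u6b22"]
-- _HOUR_LABEL = ([_LABELS[0]] * 5 + [_LABELS[1]] * 4 + [_LABELS[2]] * 6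
--                + [_LABELS[3]] * 5 + [_LABELS[4]] * 4)
--
-- def _pick_active_periods(hour_counter: Counter) -> list[str]:
--     score = dict.fromkeys(_LABELS, 0)
--     for h, c in hour_counter.items():
--         if isinstance(h, int) and 0 <= h < 24:
--             score[_HOUR_LABEL[h]] += int(c)
--     scored = [(score[label], label) for label in _LABELS]
--     scored.sort(key=lambda x: (-x[0], x[1]))
--     result = [label for s, label in scored if s > 0][:2]
--     return result or ["\u884c\u8e2a\u8f7b\u76c8"]
-- ===== Notes on version B (the rewrite author's own statement) =====
-- stated objective: alternative
-- what changed: Replaces A's per-bucket sums over 24 hour lookups in the counter by a single pass over the counter's items that adds each count to its bucket's score via a fixed hour-to-label table; the sort/filter/take tail is unchanged.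
import Mathlib
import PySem

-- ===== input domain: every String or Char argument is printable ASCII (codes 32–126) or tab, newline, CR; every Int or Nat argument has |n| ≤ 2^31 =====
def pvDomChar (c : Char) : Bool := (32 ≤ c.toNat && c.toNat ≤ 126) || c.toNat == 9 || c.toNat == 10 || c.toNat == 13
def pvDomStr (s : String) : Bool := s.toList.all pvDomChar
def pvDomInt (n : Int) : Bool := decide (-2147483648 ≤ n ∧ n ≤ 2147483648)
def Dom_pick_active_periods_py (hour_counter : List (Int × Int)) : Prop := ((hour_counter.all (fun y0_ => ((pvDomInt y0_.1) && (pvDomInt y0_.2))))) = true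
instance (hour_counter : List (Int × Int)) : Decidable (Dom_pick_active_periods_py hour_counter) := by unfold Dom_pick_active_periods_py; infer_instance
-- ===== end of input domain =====

-- B replaces A's per-bucket scan over 24 hour lookups by a single pass over the counter's
-- items through a fixed hour→label table (objective: alternative decomposition, not faster).

-- ===== PORT A =====
-- the five buckets, in A's dict insertion order, with range(a, b) as pyRange a b 1
def pick_active_periods_py (hour_counter : List (Int × Int)) : List String :=
  let buckets : List (String × List Int) :=
    [("凌晨漫游", PySem.List.pyRange 0 5 1),
     ("清晨散步", PySem.List.pyRange 5 9 1),
     ("午后驻留", PySem.List.pyRange 9 15 1),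
     ("黄昏社交", PySem.List.pyRange 15 20 1),
     ("深夜狂欢", PySem.List.pyRange 20 24 1)]
  let scored : List (Int × String) := buckets.foldl
    (fun acc lb =>
      acc ++ [((lb.2.map (fun h => (PySem.Dict.mk hour_counter).getD h 0)).sum, lb.1)]) []
  -- scored.sort(key=lambda x: (-x[0], x[1])): Python tuple keys compare lexicographically,
  -- ported with the lexicographic order Int ×ₗ String (exact: String's < is codepoint-wise like Python's)
  let scored := PySem.List.sorted scored (fun x => (toLex (-x.1, x.2) : Int ×ₗ String)) false
  let result := ((scored.filter (fun p => decide (p.1 > 0))).map (fun p => p.2)).take 2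
  if result = [] then ["行踪轻盈"] else result

-- ===== PORT B =====
def pvLabels : List String := ["凌晨漫游", "清晨散步", "午后驻留", "黄昏社交", "深夜狂欢"]
-- _HOUR_LABEL: hour → bucket label, hours 0..23
def pvHourLabel : List String :=
  List.replicate 5 "凌晨漫游" ++ List.replicate 4 "清晨散步" ++ List.replicate 6 "午后驻留"
    ++ List.replicate 5 "黄昏社交" ++ List.replicate 4 "深夜狂欢"
-- the body of B's 'for h, c in hour_counter.items()' loop
def pvStep (d : PySem.Dict String Int) (p : Int × Int) : PySem.Dict String Int :=
  if 0 ≤ p.1 ∧ p.1 < 24 then d.modify (PySem.List.pyGetD pvHourLabel p.1 "") 0 (· + p.2) else d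
def pick_active_periods_py_alt (hour_counter : List (Int × Int)) : List String :=
  -- score = dict.fromkeys(_LABELS, 0)
  let score0 : PySem.Dict String Int := pvLabels.foldl (fun d l => d.insert l 0) PySem.Dict.empty
  let score := hour_counter.foldl pvStep score0
  -- score[label] is always present, ported as getD with default 0 (exact here)
  let scored : List (Int × String) := pvLabels.map (fun l => (score.getD l 0, l))
  let scored := PySem.List.sorted scored (fun x => (toLex (-x.1, x.2) : Int ×ₗ String)) false
  let result := ((scored.filter (fun p => decide (p.1 > 0))).map (fun p => p.2)).take 2
  if result = [] then ["行踪轻盈"] else result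

-- ===== PRECONDITION & SPEC =====
-- Pre_ excludes association lists with duplicate hour keys: they represent no Python Counter
-- (a dict cannot hold a key twice), and there A's first-match lookup and B's sum over all items
-- are both accidental readings of a value that does not exist on the Python side.
def Pre_pick_active_periods_py (hour_counter : List (Int × Int)) : Prop :=
  (hour_counter.map Prod.fst).Nodup
instance (hour_counter : List (Int × Int)) : Decidable (Pre_pick_active_periods_py hour_counter) := by unfold Pre_pick_active_periods_py; infer_instance
def pvWitness_pick_active_periods_py : (List (Int × Int)) := [(5, 2), (21, 1)]
def Spec_pick_active_periods_py (hour_counter : List (Int × Int)) (out : List String) : Prop := out = pick_active_periods_py_alt hour_counter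
instance (hour_counter : List (Int × Int)) (out : List String) : Decidable (Spec_pick_active_periods_py hour_counter out) := by unfold Spec_pick_active_periods_py; infer_instance

-- ===== CLAIM (what is proved, stated in full; the proofs are below) =====
def Claim_equal_pick_active_periods_py : Prop := ∀ (hour_counter : List (Int × Int)), Dom_pick_active_periods_py hour_counter → Pre_pick_active_periods_py hour_counter → Spec_pick_active_periods_py hour_counter (pick_active_periods_py hour_counter)

-- ===== LEMMAS AND PROOFS =====

-- B's loop: the final score of a label is its initial score plus the counts of the items
-- whose hour lies in 0..23 and maps to that label.
theorem pv_fold_getD (xs : List (Int × Int)) (d : PySem.Dict String Int) (l : String) :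
    (xs.foldl pvStep d).getD l 0 =
      d.getD l 0 +
        ((xs.filter (fun p =>
            decide (0 ≤ p.1 ∧ p.1 < 24) && (PySem.List.pyGetD pvHourLabel p.1 "" == l))).map
          (fun p => p.2)).sum := by
  induction xs generalizing d with
  | nil => simp
  | cons p xs ih =>
    simp only [List.foldl_cons, List.filter_cons]
    rw [ih]
    by_cases hb : 0 ≤ p.1 ∧ p.1 < 24
    · by_cases hl : PySem.List.pyGetD pvHourLabel p.1 "" = l
      · simp [pvStep, hb, hl, PySem.Dict.getD_modify_self]
        ring
      · have := PySem.Dict.getD_modify_of_ne d (k := PySem.List.pyGetD pvHourLabel p.1 "")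
          (k' := l) 0 (fun x => x + p.2) (fun e => hl e.symm)
        simp [pvStep, hb, hl, this]
    · simp [pvStep, hb]

-- a key absent from the association list looks up to the default
theorem pv_mk_getD_not_mem (xs : List (Int × Int)) (k : Int) (h : k ∉ xs.map Prod.fst) :
    (PySem.Dict.mk xs).getD k 0 = 0 := by
  induction xs with
  | nil => simp [PySem.Dict.getD, PySem.Dict.get?]
  | cons q xs ih =>
    simp only [List.map_cons, List.mem_cons, not_or] at h
    have : (PySem.Dict.mk (q :: xs)).get? k = (PySem.Dict.mk xs).get? k := by
      rcases q with ⟨a, b⟩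
      rw [PySem.Dict.get?_mk_cons]
      simp [show ¬ (a == k) = true by simpa using fun e => h.1 (by simpa using e.symm)]
    simp only [PySem.Dict.getD] at *
    rw [this]
    exact ih h.2

-- summing 'if k = h then c else g h' over a duplicate-free list of hours
theorem pv_sum_ite_nodup (hs : List Int) (g : Int → Int) (k c : Int) (hnd : hs.Nodup)
    (hg : g k = 0) :
    (hs.map (fun h => if k = h then c else g h)).sum =
      (if k ∈ hs then c else 0) + (hs.map g).sum := by
  induction hs with
  | nil => simp
  | cons h0 hs ih =>
    rcases List.nodup_cons.mp hnd with ⟨hh, hnd'⟩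
    by_cases hk : k = h0
    · subst hk
      have : hs.map (fun h => if k = h then c else g h) = hs.map g :=
        List.map_congr_left (fun h hmem => by
          have : k ≠ h := fun e => hh (e ▸ hmem)
          simp [this])
      simp [this, hg]
    · simp only [List.map_cons, List.sum_cons, if_neg hk, ih hnd', List.mem_cons]
      have : ¬ (k = h0 ∨ k ∈ hs) ↔ ¬ (k ∈ hs) := by tauto
      by_cases hm : k ∈ hs <;> (simp [hm, hk]; try ring)

-- A's bucket sum over duplicate-free keys equals the sum of the counts with hour in the bucket
theorem pv_bucket_sum (hs : List Int) (hhs : hs.Nodup) :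
    ∀ (xs : List (Int × Int)), (xs.map Prod.fst).Nodup →
      (hs.map (fun h => (PySem.Dict.mk xs).getD h 0)).sum =
        ((xs.filter (fun p => decide (p.1 ∈ hs))).map (fun p => p.2)).sum := by
  intro xs
  induction xs with
  | nil =>
    intro _
    simp [PySem.Dict.getD, PySem.Dict.get?]
  | cons q xs ih =>
    intro hnd
    rcases q with ⟨k, c⟩
    simp only [List.map_cons, List.nodup_cons] at hnd
    have hget : ∀ h : Int, (PySem.Dict.mk ((k, c) :: xs)).getD h 0 =
        if k = h then c else (PySem.Dict.mk xs).getD h 0 := by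
      intro h
      simp only [PySem.Dict.getD, PySem.Dict.get?_mk_cons]
      by_cases e : k = h
      · simp [e]
      · simp [show ¬ (k == h) = true by simpa using e, e]
    have hsum := pv_sum_ite_nodup hs (fun h => (PySem.Dict.mk xs).getD h 0) k c hhs
      (pv_mk_getD_not_mem xs k hnd.1)
    calc (hs.map (fun h => (PySem.Dict.mk ((k, c) :: xs)).getD h 0)).sum
        = (hs.map (fun h => if k = h then c else (PySem.Dict.mk xs).getD h 0)).sum := by
          exact congrArg List.sum (List.map_congr_left (fun h _ => hget h))
      _ = (if k ∈ hs then c else 0) + (hs.map (fun h => (PySem.Dict.mk xs).getD h 0)).sum := hsum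
      _ = _ := by
          rw [ih hnd.2, List.filter_cons]
          by_cases hm : k ∈ hs <;> simp [hm]

-- the identical tail (sort, filter positives, take 2, fallback) both ports apply to their scored list
def pvTail (scored : List (Int × String)) : List String :=
  let scored := PySem.List.sorted scored (fun x => (toLex (-x.1, x.2) : Int ×ₗ String)) false
  let result := ((scored.filter (fun p => decide (p.1 > 0))).map (fun p => p.2)).take 2
  if result = [] then ["行踪轻盈"] else result

-- one bucket of A versus one label of B
theorem pv_label_eq (xs : List (Int × Int)) (hpre : (xs.map Prod.fst).Nodup)
    (a b : Int) (lab : String) (d0 : PySem.Dict String Int)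
    (hinit : d0.getD lab 0 = 0)
    (hbridge : ∀ h : Int, decide (h ∈ PySem.List.pyRange a b 1) =
      (decide (0 ≤ h ∧ h < 24) && (PySem.List.pyGetD pvHourLabel h "" == lab))) :
    ((PySem.List.pyRange a b 1).map (fun h => (PySem.Dict.mk xs).getD h 0)).sum =
      (xs.foldl pvStep d0).getD lab 0 := by
  rw [pv_fold_getD, hinit, zero_add,
    pv_bucket_sum _ (PySem.List.nodup_pyRange_one a b) xs hpre]
  exact congrArg List.sum (congrArg _ (List.filter_congr (fun p _ => hbridge p.1)))

theorem pv_bridge1 : ∀ h : Int, decide (h ∈ PySem.List.pyRange 0 5 1) =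
    (decide (0 ≤ h ∧ h < 24) && (PySem.List.pyGetD pvHourLabel h "" == "凌晨漫游")) := by
  intro h
  by_cases hb : 0 ≤ h ∧ h < 24
  · obtain ⟨h1, h2⟩ := hb
    interval_cases h <;> decide
  · have hm : ¬ h ∈ PySem.List.pyRange 0 5 1 := by
      rw [PySem.List.mem_pyRange_one]; omega
    simp [hm, hb]

theorem pv_bridge2 : ∀ h : Int, decide (h ∈ PySem.List.pyRange 5 9 1) =
    (decide (0 ≤ h ∧ h < 24) && (PySem.List.pyGetD pvHourLabel h "" == "清晨散步")) := by
  intro h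
  by_cases hb : 0 ≤ h ∧ h < 24
  · obtain ⟨h1, h2⟩ := hb
    interval_cases h <;> decide
  · have hm : ¬ h ∈ PySem.List.pyRange 5 9 1 := by
      rw [PySem.List.mem_pyRange_one]; omega
    simp [hm, hb]

theorem pv_bridge3 : ∀ h : Int, decide (h ∈ PySem.List.pyRange 9 15 1) =
    (decide (0 ≤ h ∧ h < 24) && (PySem.List.pyGetD pvHourLabel h "" == "午后驻留")) := by
  intro h
  by_cases hb : 0 ≤ h ∧ h < 24
  · obtain ⟨h1, h2⟩ := hb
    interval_cases h <;> decide
  · have hm : ¬ h ∈ PySem.List.pyRange 9 15 1 := by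
      rw [PySem.List.mem_pyRange_one]; omega
    simp [hm, hb]

theorem pv_bridge4 : ∀ h : Int, decide (h ∈ PySem.List.pyRange 15 20 1) =
    (decide (0 ≤ h ∧ h < 24) && (PySem.List.pyGetD pvHourLabel h "" == "黄昏社交")) := by
  intro h
  by_cases hb : 0 ≤ h ∧ h < 24
  · obtain ⟨h1, h2⟩ := hb
    interval_cases h <;> decide
  · have hm : ¬ h ∈ PySem.List.pyRange 15 20 1 := by
      rw [PySem.List.mem_pyRange_one]; omega
    simp [hm, hb]

theorem pv_bridge5 : ∀ h : Int, decide (h ∈ PySem.List.pyRange 20 24 1) =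
    (decide (0 ≤ h ∧ h < 24) && (PySem.List.pyGetD pvHourLabel h "" == "深夜狂欢")) := by
  intro h
  by_cases hb : 0 ≤ h ∧ h < 24
  · obtain ⟨h1, h2⟩ := hb
    interval_cases h <;> decide
  · have hm : ¬ h ∈ PySem.List.pyRange 20 24 1 := by
      rw [PySem.List.mem_pyRange_one]; omega
    simp [hm, hb]

-- ===== VERDICT (by name: the statement is the Claim_ definition above) =====
theorem pick_active_periods_py_spec : Claim_equal_pick_active_periods_py := by
  intro xs _ hpre
  unfold Spec_pick_active_periods_py
  have h1 := pv_label_eq xs hpre 0 5 "凌晨漫游" (pvLabels.foldl (fun d l => d.insert l 0) PySem.Dict.empty) (by decide) pv_bridge1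
  have h2 := pv_label_eq xs hpre 5 9 "清晨散步" (pvLabels.foldl (fun d l => d.insert l 0) PySem.Dict.empty) (by decide) pv_bridge2
  have h3 := pv_label_eq xs hpre 9 15 "午后驻留" (pvLabels.foldl (fun d l => d.insert l 0) PySem.Dict.empty) (by decide) pv_bridge3
  have h4 := pv_label_eq xs hpre 15 20 "黄昏社交" (pvLabels.foldl (fun d l => d.insert l 0) PySem.Dict.empty) (by decide) pv_bridge4
  have h5 := pv_label_eq xs hpre 20 24 "深夜狂欢" (pvLabels.foldl (fun d l => d.insert l 0) PySem.Dict.empty) (by decide) pv_bridge5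
  show pvTail _ = pvTail _
  refine congrArg pvTail ?_
  simp only [List.foldl_cons, List.foldl_nil, List.nil_append, List.cons_append, pvLabels, List.map_cons, List.map_nil]
  rw [h1, h2, h3, h4, h5]
  rfl
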